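-- pv_equiv track=rewrite | github.com/mrquintin/coherence-engine | domain/ontology.py | _find_marker_spans
-- ===== SOURCE A (Python) =====
-- from typing import Iterable, Sequence
--
-- def _find_marker_spans(text_lower: str, markers: Iterable[str]) -> list:
--     spans: list = []
--     for marker in markers:
--         m = marker.lower()
--         if not m:
--             continue
--         idx = 0
--         while True:
--             pos = text_lower.find(m, idx)
--             if pos < 0:
--                 break
--             end = pos + len(m)
--             ok_start = pos == 0 or not text_lower[pos - 1].isalnum()
--             ok_end = end == len(text_lower) or not text_lower[end].isalnum()
--             if ok_start and ok_end:
--                 spans.append((pos, end, m))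
--             idx = pos + 1
--     return spans
-- ===== SOURCE B (Python) =====
-- def _find_marker_spans(text_lower, markers):
--     # Index the text's 1/2/3-grams once; for each distinct lowered marker verify a
--     # full slice match and the word boundaries only at the positions of its leading
--     # min(3, len)-gram, memoising the span list per distinct marker.
--     n = len(text_lower)
--     index = {}
--     for k in (1, 2, 3):
--         for i in range(n - k + 1):
--             index.setdefault(text_lower[i:i + k], []).append(i)
--     spans = []
--     cache = {}
--     for marker in markers:
--         m = marker.lower()
--         if not m:
--             continue
--         sp = cache.get(m)
--         if sp is None:
--             L = len(m)
--             k = min(3, L)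
--             sp = [(p, p + L, m)
--                   for p in index.get(m[:k], [])
--                   if text_lower[p:p + L] == m
--                   and (p == 0 or not text_lower[p - 1].isalnum())
--                   and (p + L == n or not text_lower[p + L].isalnum())]
--             cache[m] = sp
--         spans.extend(sp)
--     return spans
-- ===== Notes on version B (the rewrite author's own statement) =====
-- stated objective: faster
-- what changed: Instead of restarting str.find over the whole text for every marker, B builds a 1/2/3-gram position index of the text once, verifies a slice match and the word boundaries only at the positions of the marker's leading min(3,len)-gram, and memoises the span list per distinct lowered marker so repeated markers cost only the list extend.
import Mathlib
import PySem

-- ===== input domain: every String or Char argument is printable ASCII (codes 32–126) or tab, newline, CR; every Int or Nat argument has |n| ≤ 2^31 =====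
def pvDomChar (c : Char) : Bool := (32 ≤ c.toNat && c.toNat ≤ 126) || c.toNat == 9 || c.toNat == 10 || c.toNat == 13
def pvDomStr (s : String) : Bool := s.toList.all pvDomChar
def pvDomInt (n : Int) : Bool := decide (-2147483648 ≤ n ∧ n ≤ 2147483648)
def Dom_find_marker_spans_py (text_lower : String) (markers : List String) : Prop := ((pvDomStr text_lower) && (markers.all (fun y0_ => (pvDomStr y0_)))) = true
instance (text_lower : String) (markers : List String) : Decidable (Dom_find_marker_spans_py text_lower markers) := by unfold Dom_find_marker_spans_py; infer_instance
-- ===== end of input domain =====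

-- B replaces A's per-marker str.find scan over the whole text by a 1/2/3-gram
-- position index of the text built once plus a per-distinct-marker memo: candidates
-- are verified only at the positions of the marker's leading min(3, len)-gram and a
-- repeated marker reuses its cached span list (objective: faster).

-- ===== PORT A =====
-- text_lower[i].isalnum(); both ports only evaluate it at in-range i (guarded by the
-- preceding 'p == 0' / 'p + L == n' disjunct), so the none branch is unreachable.
def pvIsAlnumAt (tl : List Char) (i : Int) : Bool :=
  match PySem.List.pyGet? tl i with
  | some ch => PySem.Chars.isalnum ch
  | none => false

-- A's 'while True' loop for one (lowered, nonempty) marker m; fuel bounds the number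
-- of iterations (idx strictly increases and stays ≤ len, so len + 2 always suffices).
def pvLoopA (tl m : List Char) (idx : Nat) : Nat → List (Int × Int × String)
  | 0 => []
  | fuel + 1 =>
    let pos := PySem.Chars.findFrom tl m (idx : Int) none
    if pos < 0 then []
    else
      let p := pos.toNat
      let e := p + m.length
      let okStart := (p == 0) || !pvIsAlnumAt tl ((p : Int) - 1)
      let okEnd := (e == tl.length) || !pvIsAlnumAt tl (e : Int)
      (if okStart && okEnd then [((p : Int), (e : Int), String.ofList m)] else []) ++
        pvLoopA tl m (p + 1) fuel

def find_marker_spans_py (text_lower : String) (markers : List String) : List (Int × Int × String) :=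
  markers.foldl (fun spans marker =>
    let m := PySem.Chars.lower marker.toList
    if m = [] then spans
    else spans ++ pvLoopA text_lower.toList m 0 (text_lower.toList.length + 2)) []

-- ===== PORT B =====
-- index.setdefault(text_lower[i:i+k], []).append(i)  for k in (1, 2, 3)
def pvGramIdx (tl : List Char) : PySem.Dict (List Char) (List Int) :=
  ([1, 2, 3] : List Int).foldl (fun d k =>
    (PySem.List.pyRange 0 ((tl.length : Int) - k + 1) 1).foldl
      (fun d i => d.modify (PySem.List.slice tl (some i) (some (i + k))) [] (· ++ [i])) d)
    PySem.Dict.empty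

-- the span list of one (lowered, nonempty) marker m: full slice match and word
-- boundaries checked only at the positions of m's leading min(3, len(m))-gram
def pvSpB (tl : List Char) (index : PySem.Dict (List Char) (List Int)) (m : List Char) :
    List (Int × Int × String) :=
  let L := (m.length : Int)
  let k := min 3 L
  ((index.getD (PySem.List.slice m none (some k)) []).filter (fun p =>
      (PySem.List.slice tl (some p) (some (p + L)) == m)
      && ((p == 0) || !pvIsAlnumAt tl (p - 1))
      && ((p + L == (tl.length : Int)) || !pvIsAlnumAt tl (p + L)))).map
    (fun p => (p, p + L, String.ofList m))

-- one iteration of B's marker loop; the state is (spans, cache)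
def pvStepB (tl : List Char) (index : PySem.Dict (List Char) (List Int))
    (st : List (Int × Int × String) × PySem.Dict (List Char) (List (Int × Int × String)))
    (marker : String) :
    List (Int × Int × String) × PySem.Dict (List Char) (List (Int × Int × String)) :=
  let m := PySem.Chars.lower marker.toList
  match m with
  | [] => st
  | _ :: _ =>
    match st.2.get? m with
    | some sp => (st.1 ++ sp, st.2)
    | none =>
      let sp := pvSpB tl index m
      (st.1 ++ sp, st.2.insert m sp)

def find_marker_spans_py_alt (text_lower : String) (markers : List String) : List (Int × Int × String) :=
  let tl := text_lower.toList
  (markers.foldl (pvStepB tl (pvGramIdx tl)) ([], PySem.Dict.empty)).1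

-- ===== PRECONDITION & SPEC =====
def Spec_find_marker_spans_py (text_lower : String) (markers : List String) (out : List (Int × Int × String)) : Prop := out = find_marker_spans_py_alt text_lower markers
instance (text_lower : String) (markers : List String) (out : List (Int × Int × String)) : Decidable (Spec_find_marker_spans_py text_lower markers out) := by unfold Spec_find_marker_spans_py; infer_instance

-- ===== CLAIM (what is proved, stated in full; the proofs are below) =====
def Claim_equal_find_marker_spans_py : Prop := ∀ (text_lower : String) (markers : List String), Dom_find_marker_spans_py text_lower markers → Spec_find_marker_spans_py text_lower markers (find_marker_spans_py text_lower markers)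

-- ===== LEMMAS AND PROOFS =====

-- the common specification of one marker's contribution: a word-boundary match at p
def pvGood (tl m : List Char) (p : Nat) : Bool :=
  decide (m <+: tl.drop p)
  && ((((p : Int) == 0) || !pvIsAlnumAt tl ((p : Int) - 1))
  && (((p : Int) + (m.length : Int) == (tl.length : Int)) || !pvIsAlnumAt tl ((p : Int) + (m.length : Int))))

def pvSpecM (tl m : List Char) : List (Int × Int × String) :=
  ((List.range tl.length).filter (pvGood tl m)).map
    (fun (p : Nat) => ((p : Int), (p : Int) + (m.length : Int), String.ofList m))

theorem pvLoopA_eq (tl m : List Char) (hm : m ≠ []) :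
    ∀ (fuel idx : Nat), idx ≤ tl.length → tl.length - idx < fuel →
      pvLoopA tl m idx fuel =
        ((List.range' idx (tl.length - idx)).filter (pvGood tl m)).map
          (fun (p : Nat) => ((p : Int), (p : Int) + (m.length : Int), String.ofList m)) := by
  intro fuel
  induction fuel with
  | zero => intro idx h1 h2; omega
  | succ fuel ih =>
    intro idx h1 h2
    by_cases hneg : PySem.Chars.findFrom tl m (idx : Int) none = -1
    · have hlhs : pvLoopA tl m idx (fuel + 1) = [] := by
        simp only [pvLoopA]
        rw [if_pos (by rw [hneg]; norm_num)]
      rw [hlhs]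
      have hno := (PySem.Chars.findFrom_natCast_eq_neg_one_iff tl m idx h1).mp hneg
      have hfe : (List.range' idx (tl.length - idx)).filter (pvGood tl m) = [] := by
        apply List.filter_eq_nil_iff.mpr
        intro i hi h
        have hmem := List.mem_range'_1.mp hi
        simp only [pvGood, Bool.and_eq_true, decide_eq_true_eq] at h
        exact hno (List.infix_iff_prefix_suffix.mpr
          ⟨tl.drop i, h.1, by
            have hdd : tl.drop i = List.drop (i - idx) (tl.drop idx) := by
              rw [List.drop_drop]; congr 1; omega
            rw [hdd]; exact List.drop_suffix _ _⟩)
      rw [hfe]; rfl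
    · obtain ⟨hge, hpref, hmin⟩ := PySem.Chars.findFrom_natCast_spec tl m idx h1 hneg
      have h0 : (0 : Int) ≤ PySem.Chars.findFrom tl m (idx : Int) none :=
        le_trans (Int.natCast_nonneg idx) hge
      set pos := PySem.Chars.findFrom tl m (idx : Int) none with hpos
      set p := pos.toNat with hp
      have hidxp : idx ≤ p := by omega
      have hplen : p < tl.length := by
        by_contra hcon
        rw [List.drop_eq_nil_of_le (by omega)] at hpref
        exact hm (List.prefix_nil.mp hpref)
      have hlhs : pvLoopA tl m idx (fuel + 1) =
          (if ((p == 0) || !pvIsAlnumAt tl ((p : Int) - 1))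
              && ((p + m.length == tl.length) || !pvIsAlnumAt tl ((p + m.length : Nat) : Int))
            then [((p : Int), ((p + m.length : Nat) : Int), String.ofList m)] else [])
          ++ pvLoopA tl m (p + 1) fuel := by
        simp only [pvLoopA]
        rw [if_neg (by omega)]
      rw [hlhs]
      have hsplit : List.range' idx (tl.length - idx) =
          List.range' idx (p - idx) ++ p :: List.range' (p + 1) (tl.length - (p + 1)) := by
        have harith : tl.length - idx = (p - idx) + ((tl.length - (p + 1)) + 1) := by omega
        rw [harith, ← List.range'_append (s := idx) (step := 1),
            show idx + 1 * (p - idx) = p from by omega, List.range'_succ]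
      rw [hsplit, List.filter_append, List.map_append]
      have h1e : (List.range' idx (p - idx)).filter (pvGood tl m) = [] := by
        apply List.filter_eq_nil_iff.mpr
        intro i hi h
        have hmem := List.mem_range'_1.mp hi
        simp only [pvGood, Bool.and_eq_true, decide_eq_true_eq] at h
        exact hmin i hmem.1 (by omega) h.1
      rw [h1e, List.filter_cons]
      have hcast : ((p : Int) + (m.length : Int)) = ((p + m.length : Nat) : Int) := by
        push_cast; ring
      have e1 : (((p : Nat) : Int) == 0) = (p == 0) := by
        apply Bool.eq_iff_iff.mpr
        simp only [beq_iff_eq]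
        omega
      have e2 : (((p + m.length : Nat) : Int) == ((tl.length : Nat) : Int)) = ((p + m.length : Nat) == tl.length) := by
        apply Bool.eq_iff_iff.mpr
        simp only [beq_iff_eq]
        omega
      have hgood : pvGood tl m p =
          (((p == 0) || !pvIsAlnumAt tl ((p : Int) - 1))
            && ((p + m.length == tl.length) || !pvIsAlnumAt tl ((p + m.length : Nat) : Int))) := by
        simp only [pvGood, hpref, decide_true, Bool.true_and]
        rw [hcast, e1, e2]
      rw [hgood, ih (p + 1) (by omega) (by omega)]
      by_cases hok : (((p == 0) || !pvIsAlnumAt tl ((p : Int) - 1))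
          && ((p + m.length == tl.length) || !pvIsAlnumAt tl ((p + m.length : Nat) : Int))) = true
      · simp only [if_pos hok, List.map_nil, List.nil_append, List.map_cons,
          List.singleton_append, hcast]
      · simp only [if_neg hok, List.map_nil, List.nil_append]

-- one per-gram-length pass of B's index build, characterised
def pvPart (tl : List Char) (k : Nat) (g : List Char) : List Int :=
  ((List.range (tl.length + 1 - k)).filter (fun j => (tl.drop j).take k == g)).map
    (fun (j : Nat) => (j : Int))

theorem pvGramPass (tl : List Char) (k : Int) (hk : 1 ≤ k) (g : List Char)
    (d : PySem.Dict (List Char) (List Int)) :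
    ((PySem.List.pyRange 0 ((tl.length : Int) - k + 1) 1).foldl
      (fun d i => d.modify (PySem.List.slice tl (some i) (some (i + k))) [] (· ++ [i])) d).getD g []
    = d.getD g [] ++ (if g.length = k.toNat then pvPart tl k.toNat g else []) := by
  obtain ⟨κ, rfl⟩ : ∃ κ : Nat, k = (κ : Int) := ⟨k.toNat, by omega⟩
  simp only [Int.toNat_natCast]
  have hfold :
      (PySem.List.pyRange 0 ((tl.length : Int) - (κ : Int) + 1) 1).foldl
        (fun d i => d.modify (PySem.List.slice tl (some i) (some (i + (κ : Int)))) [] (· ++ [i])) d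
      = ((PySem.List.pyRange 0 ((tl.length : Int) - (κ : Int) + 1) 1).map
          (fun i => (PySem.List.slice tl (some i) (some (i + (κ : Int))), i))).foldl
          (fun d q => d.modify q.1 [] (· ++ [q.2])) d := by
    rw [List.foldl_map]
  rw [hfold, PySem.Dict.getD_foldl_modify_append]
  congr 1
  simp only [List.filter_map, List.map_map, PySem.List.pyRange_zero]
  have hM : ((tl.length : Int) - (κ : Int) + 1).toNat = tl.length + 1 - κ := by omega
  rw [hM]
  by_cases hg : g.length = κ
  · rw [if_pos hg]
    unfold pvPart
    have hpred : ∀ j ∈ List.range (tl.length + 1 - κ),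
        ((fun p => p.1 == g) ∘ (fun i => (PySem.List.slice tl (some i) (some (i + (κ : Int))), i))
          ∘ (fun (j : Nat) => (j : Int))) j = ((tl.drop j).take κ == g) := by
      intro j _
      simp only [Function.comp]
      rw [PySem.List.slice_natCast_add]
    rw [List.filter_congr hpred]
    apply List.map_congr_left
    intro j _
    rfl
  · rw [if_neg hg]
    have hnil : (List.range (tl.length + 1 - κ)).filter
        ((fun p => p.1 == g) ∘ (fun i => (PySem.List.slice tl (some i) (some (i + (κ : Int))), i))
          ∘ (fun (j : Nat) => (j : Int))) = [] := by
      apply List.filter_eq_nil_iff.mpr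
      intro j hj h
      have hjlt := List.mem_range.mp hj
      simp only [Function.comp, PySem.List.slice_natCast_add, beq_iff_eq] at h
      apply hg
      rw [← h, List.length_take, List.length_drop]
      omega
    rw [hnil]
    rfl

theorem pvGramIdx_getD (tl g : List Char) (h1 : 1 ≤ g.length) (h3 : g.length ≤ 3) :
    (pvGramIdx tl).getD g [] = pvPart tl g.length g := by
  unfold pvGramIdx
  simp only [List.foldl_cons, List.foldl_nil]
  rw [pvGramPass tl 3 (by norm_num) g _, pvGramPass tl 2 (by norm_num) g _,
      pvGramPass tl 1 (by norm_num) g _, PySem.Dict.getD_empty]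
  have hcases : g.length = 1 ∨ g.length = 2 ∨ g.length = 3 := by omega
  rcases hcases with h | h | h <;> simp [h]

theorem pvSpB_eq (tl m : List Char) (hm : m ≠ []) :
    pvSpB tl (pvGramIdx tl) m = pvSpecM tl m := by
  have hm1 : 1 ≤ m.length := List.length_pos_iff.mpr hm
  set κ := min 3 m.length with hκ
  have hκ1 : 1 ≤ κ := by omega
  have hκm : κ ≤ m.length := by omega
  have hκ3 : κ ≤ 3 := by omega
  simp only [pvSpB]
  have hkey : PySem.List.slice m none (some (min 3 ((m.length : Nat) : Int))) = m.take κ := by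
    rw [PySem.List.slice_to m (by omega)]
    congr 1
    omega
  rw [hkey]
  have hglen : (m.take κ).length = κ := by
    rw [List.length_take]
    omega
  rw [pvGramIdx_getD tl (m.take κ) (by omega) (by omega), hglen]
  unfold pvPart
  rw [List.filter_map, List.map_map, List.filter_filter]
  have hfeq : (List.range (tl.length + 1 - κ)).filter (fun j =>
      ((fun p =>
          (PySem.List.slice tl (some p) (some (p + ((m.length : Nat) : Int))) == m)
          && ((p == 0) || !pvIsAlnumAt tl (p - 1))
          && ((p + ((m.length : Nat) : Int) == ((tl.length : Nat) : Int)) || !pvIsAlnumAt tl (p + ((m.length : Nat) : Int))))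
        ∘ (fun (j : Nat) => (j : Int))) j && ((tl.drop j).take κ == m.take κ)) =
      (List.range (tl.length + 1 - κ)).filter (pvGood tl m) := by
    apply List.filter_congr
    intro j _
    simp only [Function.comp]
    rw [PySem.List.slice_natCast_add]
    by_cases hpref : m <+: tl.drop j
    · have htake : (List.take m.length (tl.drop j) == m) = true := by
        simp only [beq_iff_eq]
        exact (List.prefix_iff_eq_take.mp hpref).symm
      have hgram : ((tl.drop j).take κ == m.take κ) = true := by
        simp only [beq_iff_eq]
        rw [List.prefix_iff_eq_take.mp hpref, List.take_take]
        congr 1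
        omega
      simp only [pvGood, hpref, decide_true, htake, hgram, Bool.true_and, Bool.and_true]
    · have htake : (List.take m.length (tl.drop j) == m) = false := by
        simp only [beq_eq_false_iff_ne, ne_eq]
        intro h
        exact hpref (List.prefix_iff_eq_take.mpr h.symm)
      simp [pvGood, hpref, htake]
  rw [hfeq]
  have hext : (List.range (tl.length + 1 - κ)).filter (pvGood tl m) =
      (List.range tl.length).filter (pvGood tl m) := by
    have hle : tl.length + 1 - κ ≤ tl.length := by omega
    have hsplit : List.range tl.length =
        List.range (tl.length + 1 - κ) ++
          List.range' (tl.length + 1 - κ) (tl.length - (tl.length + 1 - κ)) := by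
      rw [List.range_eq_range', List.range_eq_range']
      conv_lhs => rw [show tl.length = (tl.length + 1 - κ) + (tl.length - (tl.length + 1 - κ)) from
        by omega]
      rw [← List.range'_append (s := 0) (step := 1)]
      congr 1
      norm_num
    rw [hsplit, List.filter_append]
    have hnil : (List.range' (tl.length + 1 - κ) (tl.length - (tl.length + 1 - κ))).filter
        (pvGood tl m) = [] := by
      apply List.filter_eq_nil_iff.mpr
      intro j hj h
      have hmem := List.mem_range'_1.mp hj
      simp only [pvGood, Bool.and_eq_true, decide_eq_true_eq] at h
      have hlen := h.1.length_le
      rw [List.length_drop] at hlen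
      omega
    rw [hnil, List.append_nil]
  rw [hext]
  unfold pvSpecM
  apply List.map_congr_left
  intro j _
  rfl

-- the canonical per-marker fold both programs are reduced to
def pvCanon (tl : List Char) (spans : List (Int × Int × String)) (marker : String) :
    List (Int × Int × String) :=
  if PySem.Chars.lower marker.toList = [] then spans
  else spans ++ pvSpecM tl (PySem.Chars.lower marker.toList)

theorem pvFoldB_eq (tl : List Char) (ms : List String) :
    ∀ (acc : List (Int × Int × String)) (d : PySem.Dict (List Char) (List (Int × Int × String))),
      (∀ m' sp, d.get? m' = some sp → sp = pvSpecM tl m') →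
      (ms.foldl (pvStepB tl (pvGramIdx tl)) (acc, d)).1 = ms.foldl (pvCanon tl) acc := by
  induction ms with
  | nil => intro acc d _; rfl
  | cons marker ms ih =>
    intro acc d hinv
    rw [List.foldl_cons, List.foldl_cons]
    rcases hm : PySem.Chars.lower marker.toList with _ | ⟨c, r⟩
    · have hstep : pvStepB tl (pvGramIdx tl) (acc, d) marker = (acc, d) := by
        simp only [pvStepB, hm]
      have hcanon : pvCanon tl acc marker = acc := by simp [pvCanon, hm]
      rw [hstep, hcanon]
      exact ih acc d hinv
    · have hcanon : pvCanon tl acc marker = acc ++ pvSpecM tl (c :: r) := by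
        simp [pvCanon, hm]
      rcases hc : d.get? (c :: r) with _ | sp
      · have hstep : pvStepB tl (pvGramIdx tl) (acc, d) marker =
            (acc ++ pvSpB tl (pvGramIdx tl) (c :: r),
             d.insert (c :: r) (pvSpB tl (pvGramIdx tl) (c :: r))) := by
          simp only [pvStepB, hm, hc]
        rw [hstep, hcanon, pvSpB_eq tl (c :: r) (by simp)]
        apply ih
        intro m' sp' hg
        rw [PySem.Dict.get?_insert] at hg
        by_cases he : m' = c :: r
        · rw [if_pos he] at hg
          cases hg
          rw [he]
        · rw [if_neg he] at hg
          exact hinv m' sp' hg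
      · have hstep : pvStepB tl (pvGramIdx tl) (acc, d) marker = (acc ++ sp, d) := by
          simp only [pvStepB, hm, hc]
        rw [hstep, hcanon, hinv (c :: r) sp hc]
        exact ih _ d hinv

-- ===== VERDICT (by name: the statement is the Claim_ definition above) =====
theorem find_marker_spans_py_spec : Claim_equal_find_marker_spans_py := by
  intro text_lower markers hdom
  clear hdom
  unfold Spec_find_marker_spans_py find_marker_spans_py find_marker_spans_py_alt
  rw [pvFoldB_eq text_lower.toList markers [] PySem.Dict.empty
    (by intro m' sp h; rw [PySem.Dict.get?_empty] at h; cases h)]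
  apply PySem.List.foldl_congr_mem
  intro acc marker _
  rcases hcase : PySem.Chars.lower marker.toList with _ | ⟨c, r⟩
  · simp [pvCanon, hcase]
  · have hA : pvLoopA text_lower.toList (c :: r) 0 (text_lower.toList.length + 2) =
        pvSpecM text_lower.toList (c :: r) := by
      have h := pvLoopA_eq text_lower.toList (c :: r) (by simp) (text_lower.toList.length + 2) 0
        (by omega) (by omega)
      simpa [pvSpecM, List.range_eq_range'] using h
    rw [if_neg (by simp), hA]
    simp only [pvCanon, hcase]
    rw [if_neg (by simp)]
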